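-- pv_equiv track=rewrite | github.com/Ph0enix19/Komplain.ai | backend/agents.py | _contains_malay_markers
-- ===== SOURCE A (Python) =====
-- def _contains_malay_markers(text: str | None) -> bool:
--     if not text:
--         return False
--     lowered = text.lower()
--     markers = (
--         "saya",
--         "barang",
--         "pesanan",
--         "bayaran balik",
--         "rosak",
--         "koyak",
--         "tak ",
--         "tidak ",
--         "belum",
--         "sampai",
--         "pelanggan",
--         "memerlukan",
--         "semakan",
--         "dihantar",
--         "diterima",
--         "bungkusan",
--     )
--     return any(marker in lowered for marker in markers)
-- ===== SOURCE B (Python) =====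
-- _MARKERS = (
--     "saya", "barang", "pesanan", "bayaran balik", "rosak", "koyak",
--     "tak ", "tidak ", "belum", "sampai", "pelanggan", "memerlukan",
--     "semakan", "dihantar", "diterima", "bungkusan",
-- )
--
--
-- def _scan(s):
--     # Suffix scan: a marker occurs in s iff some marker is a prefix of the
--     # current suffix; otherwise continue with the tail.
--     while s:
--         for m in _MARKERS:
--             if s.startswith(m):
--                 return True
--         s = s[1:]
--     return False
--
--
-- def _contains_malay_markers(text):
--     if not text:
--         return False
--     return _scan(text.lower())
-- ===== Notes on version B (the rewrite author's own statement) =====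
-- stated objective: alternative
-- what changed: A's marker-major search (16 independent full substring `in` scans) is replaced by a recursive suffix scan: a helper tests whether any marker is a prefix of the current suffix and otherwise recurses on the tail, so the text is traversed once position by position.
import Mathlib
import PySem

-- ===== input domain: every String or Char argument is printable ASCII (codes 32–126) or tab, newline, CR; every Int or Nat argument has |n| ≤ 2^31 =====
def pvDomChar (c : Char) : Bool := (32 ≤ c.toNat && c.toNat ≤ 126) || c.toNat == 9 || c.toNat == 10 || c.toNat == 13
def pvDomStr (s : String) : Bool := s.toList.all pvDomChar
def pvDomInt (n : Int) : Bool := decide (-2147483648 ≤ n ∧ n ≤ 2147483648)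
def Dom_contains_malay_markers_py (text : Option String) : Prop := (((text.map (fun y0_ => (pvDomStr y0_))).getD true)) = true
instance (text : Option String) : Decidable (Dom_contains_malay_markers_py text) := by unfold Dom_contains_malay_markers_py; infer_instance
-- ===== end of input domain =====

-- B replaces A's 16 independent substring scans by one recursive suffix scan
-- that checks marker prefixes and recurses on the tail (objective: alternative).

-- ===== PORT A =====
def contains_malay_markers_py (text : Option String) : Bool :=
  match text with
  | none => false
  | some s =>
    if s == "" then false
    else
      let lowered := PySem.Str.lower s
      (["saya", "barang", "pesanan", "bayaran balik", "rosak", "koyak",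
        "tak ", "tidak ", "belum", "sampai", "pelanggan", "memerlukan",
        "semakan", "dihantar", "diterima", "bungkusan"] : List String).any
        (fun marker => PySem.Str.isIn marker lowered)

-- ===== PORT B =====
-- B's module-level marker tuple, as character lists (the scanner works on List Char)
def pvMarkersB : List (List Char) :=
  ['s','a','y','a'] :: ['b','a','r','a','n','g'] :: ['p','e','s','a','n','a','n'] ::
  ['b','a','y','a','r','a','n',' ','b','a','l','i','k'] :: ['r','o','s','a','k'] ::
  ['k','o','y','a','k'] :: ['t','a','k',' '] :: ['t','i','d','a','k',' '] ::
  ['b','e','l','u','m'] :: ['s','a','m','p','a','i'] ::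
  ['p','e','l','a','n','g','g','a','n'] :: ['m','e','m','e','r','l','u','k','a','n'] ::
  ['s','e','m','a','k','a','n'] :: ['d','i','h','a','n','t','a','r'] ::
  ['d','i','t','e','r','i','m','a'] :: ['b','u','n','g','k','u','s','a','n'] :: []

-- the recursive helper _scan
def pvScan : List Char → Bool
  | [] => false
  | c :: rest =>
      if pvMarkersB.any (fun m => PySem.Chars.startswith (c :: rest) m) then true
      else pvScan rest

def contains_malay_markers_py_alt (text : Option String) : Bool :=
  match text with
  | none => false
  | some s =>
    if s == "" then false
    else pvScan (PySem.Chars.lower s.toList)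

-- ===== PRECONDITION & SPEC =====
def Spec_contains_malay_markers_py (text : Option String) (out : Bool) : Prop := out = contains_malay_markers_py_alt text
instance (text : Option String) (out : Bool) : Decidable (Spec_contains_malay_markers_py text out) := by unfold Spec_contains_malay_markers_py; infer_instance

-- ===== CLAIM =====
def Claim_equal_contains_malay_markers_py : Prop := ∀ (text : Option String), Dom_contains_malay_markers_py text → Spec_contains_malay_markers_py text (contains_malay_markers_py text)

-- ===== LEMMAS AND PROOFS =====

-- the scanner finds exactly the lists that have some marker as a prefix of some suffix
lemma pvScan_iff (L : List Char) :
    pvScan L = true ↔ ∃ m ∈ pvMarkersB, ∃ j, m <+: L.drop j := by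
  induction L with
  | nil =>
    simp only [pvScan]
    constructor
    · intro h; exact absurd h (by decide)
    · rintro ⟨m, hm, j, hj⟩
      simp only [List.drop_nil, List.prefix_nil] at hj
      subst hj
      exact absurd hm (by decide)
  | cons c rest ih =>
    simp only [pvScan]
    split_ifs with h
    · simp only [true_iff]
      obtain ⟨m, hm, hpre⟩ := List.any_eq_true.mp h
      exact ⟨m, hm, 0, by simpa using (PySem.Chars.startswith_iff _ _).mp hpre⟩
    · rw [ih]
      constructor
      · rintro ⟨m, hm, j, hj⟩
        exact ⟨m, hm, j + 1, by simpa using hj⟩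
      · rintro ⟨m, hm, j, hj⟩
        cases j with
        | zero =>
          exfalso
          exact h (List.any_eq_true.mpr ⟨m, hm, (PySem.Chars.startswith_iff _ _).mpr (by simpa using hj)⟩)
        | succ j' => exact ⟨m, hm, j', by simpa using hj⟩

-- B's char-list markers are exactly A's string markers
lemma markersB_eq :
    pvMarkersB = (["saya", "barang", "pesanan", "bayaran balik", "rosak", "koyak",
      "tak ", "tidak ", "belum", "sampai", "pelanggan", "memerlukan",
      "semakan", "dihantar", "diterima", "bungkusan"] : List String).map String.toList := by
  decide

-- ===== VERDICT =====
theorem contains_malay_markers_py_spec : Claim_equal_contains_malay_markers_py := by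
  intro text _
  unfold Spec_contains_malay_markers_py contains_malay_markers_py contains_malay_markers_py_alt
  match text with
  | none => rfl
  | some s =>
    by_cases hs : s == ""
    · simp [hs]
    · simp only [hs, Bool.false_eq_true, if_false]
      rw [Bool.eq_iff_iff, pvScan_iff, markersB_eq, List.any_eq_true]
      constructor
      · rintro ⟨m, hm, hin⟩
        rw [PySem.Str.isIn_eq, PySem.Str.toList_lower] at hin
        obtain ⟨j, hj⟩ := (PySem.Chars.exists_prefix_drop_iff_isIn _ _).mpr hin
        exact ⟨m.toList, List.mem_map_of_mem hm, j, hj⟩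
      · rintro ⟨ml, hml, j, hj⟩
        obtain ⟨m, hm, rfl⟩ := List.mem_map.mp hml
        refine ⟨m, hm, ?_⟩
        rw [PySem.Str.isIn_eq, PySem.Str.toList_lower]
        exact (PySem.Chars.exists_prefix_drop_iff_isIn _ _).mp ⟨j, hj⟩
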